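-- pv_equiv track=rewrite | github.com/NevadaM/OGC_evals | ogc_eval/afg.py | _parse_output
-- ===== SOURCE A (Python) =====
-- from typing import List, Tuple, Dict, Any
--
-- def _parse_output(output: str) -> List[str]:
--     # Parse lines starting with "- "
--     lines = output.strip().split('\n')
--     facts = []
--     for line in lines:
--         line = line.strip()
--         if line.startswith("- "):
--             facts.append(line[2:].strip())
--         elif line.startswith("* "):
--              facts.append(line[2:].strip())
--     return facts
-- ===== SOURCE B (Python) =====
-- from typing import List
--
--
-- def _parse_output(output: str) -> List[str]:
--     # Single-pass scanner: modes 0=line indent, 1=saw bullet marker, 2=bullet content, 3=skip line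
--     facts = []
--     mode = 0
--     buf = []
--     for ch in output:
--         if ch == '\n':
--             if mode == 2:
--                 fact = ''.join(buf).strip()
--                 if fact:
--                     facts.append(fact)
--             mode = 0
--             buf = []
--         elif mode == 0:
--             if ch == '-' or ch == '*':
--                 mode = 1
--             elif ch.isspace():
--                 pass
--             else:
--                 mode = 3
--         elif mode == 1:
--             mode = 2 if ch == ' ' else 3
--             buf = []
--         elif mode == 2:
--             buf.append(ch)
--     if mode == 2:
--         fact = ''.join(buf).strip()
--         if fact:
--             facts.append(fact)
--     return facts
-- ===== Notes on version B (the rewrite author's own statement) =====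
-- stated objective: alternative
-- what changed: Replaced strip-then-split-into-lines-then-per-line-strip/startswith with a single-pass character state machine (indent/marker/content/skip modes) that never materialises the line list or stripped intermediate strings.
import Mathlib
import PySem

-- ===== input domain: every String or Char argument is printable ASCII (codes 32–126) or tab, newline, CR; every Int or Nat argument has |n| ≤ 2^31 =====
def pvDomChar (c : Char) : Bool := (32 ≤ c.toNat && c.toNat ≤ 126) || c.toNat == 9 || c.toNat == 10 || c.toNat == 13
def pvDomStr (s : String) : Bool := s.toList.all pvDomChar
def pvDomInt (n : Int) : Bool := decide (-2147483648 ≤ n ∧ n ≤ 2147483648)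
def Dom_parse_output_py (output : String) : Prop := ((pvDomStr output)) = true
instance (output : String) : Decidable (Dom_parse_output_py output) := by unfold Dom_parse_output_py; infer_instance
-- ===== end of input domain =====

-- B replaces A's strip+split+per-line-strip pipeline with a single-pass character state machine (alternative decomposition, same cost).

-- ===== PORT A =====
def parse_output_py (output : String) : List String :=
  let lines := PySem.Chars.splitOn (PySem.Chars.strip output.toList) ['\n']
  (lines.foldl (fun facts line =>
      let line := PySem.Chars.strip line
      if PySem.Chars.startswith line ['-', ' '] then
        facts ++ [PySem.Chars.strip (PySem.Chars.slice line (some 2) none)]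
      else if PySem.Chars.startswith line ['*', ' '] then
        facts ++ [PySem.Chars.strip (PySem.Chars.slice line (some 2) none)]
      else facts) ([] : List (List Char))).map String.ofList

-- ===== PORT B =====
-- `fact = ''.join(buf).strip(); if fact: facts.append(fact)`
def pvEmit (buf : List Char) (facts : List (List Char)) : List (List Char) :=
  let fact := PySem.Chars.strip buf
  if fact = [] then facts else facts ++ [fact]

-- one step of B's state machine; state = (mode, buf, facts), modes 0=indent, 1=saw marker, 2=content, 3=skip
def pvStep (st : Nat × List Char × List (List Char)) (ch : Char) : Nat × List Char × List (List Char) :=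
  match st with
  | (mode, buf, facts) =>
    if ch = '\n' then
      (0, [], if mode = 2 then pvEmit buf facts else facts)
    else if mode = 0 then
      if ch = '-' ∨ ch = '*' then (1, buf, facts)
      else if PySem.Chars.isspace ch then (0, buf, facts)
      else (3, buf, facts)
    else if mode = 1 then
      ((if ch = ' ' then 2 else 3), [], facts)
    else if mode = 2 then (2, buf ++ [ch], facts)
    else (3, buf, facts)

-- the trailing `if mode == 2: ...` after the loop
def pvFinish (st : Nat × List Char × List (List Char)) : List (List Char) :=
  if st.1 = 2 then pvEmit st.2.1 st.2.2 else st.2.2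

def parse_output_py_alt (output : String) : List String :=
  (pvFinish (output.toList.foldl pvStep (0, [], []))).map String.ofList

-- ===== PRECONDITION & SPEC =====
def Spec_parse_output_py (output : String) (out : List String) : Prop := out = parse_output_py_alt output
instance (output : String) (out : List String) : Decidable (Spec_parse_output_py output out) := by unfold Spec_parse_output_py; infer_instance

-- ===== CLAIM (what is proved, stated in full; the proofs are below) =====
def Claim_equal_parse_output_py : Prop := ∀ (output : String), Dom_parse_output_py output → Spec_parse_output_py output (parse_output_py output)

-- ===== LEMMAS AND PROOFS =====

def pvLines : List Char → List (List Char)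
  | [] => [[]]
  | c :: t => if c = '\n' then [] :: pvLines t else (pvLines t).modifyHead (c :: ·)

theorem pvLines_ne_nil (l : List Char) : pvLines l ≠ [] := by
  induction l with
  | nil => simp [pvLines]
  | cons c t ih =>
    simp only [pvLines]
    split
    · simp
    · cases h : pvLines t with
      | nil => exact absurd h ih
      | cons a b => simp

theorem pv_go (fuel : Nat) : ∀ (l cur : List Char) (acc : List (List Char)), l.length < fuel →
    PySem.Chars.splitOn.go ['\n'] fuel l cur acc
      = acc.reverse ++ (pvLines l).modifyHead (cur.reverse ++ ·) := by
  induction fuel with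
  | zero => intro l cur acc h; simp at h
  | succ n ih =>
    intro l cur acc h
    cases l with
    | nil =>
      rw [PySem.Chars.splitOn.go.eq_def]
      simp [pvLines]
    | cons c t =>
      rw [PySem.Chars.splitOn.go.eq_def]
      by_cases hc : c = '\n'
      · subst hc
        have hp : ['\n'].isPrefixOf ('\n' :: t) = true := by simp [List.isPrefixOf]
        simp only [hp, if_true, List.length_cons, List.length_nil, List.drop_succ_cons, List.drop_zero]
        rw [ih t [] _ (by simpa using Nat.lt_of_succ_lt_succ h)]
        cases ht : pvLines t with
        | nil => exact absurd ht (pvLines_ne_nil t)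
        | cons a b => simp [pvLines, ht]
      · have hp : ['\n'].isPrefixOf (c :: t) = false := by
          simp [List.isPrefixOf]; exact fun hh => absurd hh.symm hc
        simp only [hp]
        rw [ih t (c :: cur) _ (by simpa using Nat.lt_of_succ_lt_succ h)]
        cases ht : pvLines t with
        | nil => exact absurd ht (pvLines_ne_nil t)
        | cons a b => simp [pvLines, ht, hc]

theorem pv_splitOn (s : List Char) : PySem.Chars.splitOn s ['\n'] = pvLines s := by
  rw [PySem.Chars.splitOn, pv_go (s.length + 1) s [] [] (by omega)]
  cases ht : pvLines s with
  | nil => exact absurd ht (pvLines_ne_nil s)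
  | cons a b => simp

-- ===== strip support lemmas =====
theorem pv_dropWhile_dropWhile {α : Type} (p : α → Bool) (l : List α) :
    List.dropWhile p (List.dropWhile p l) = List.dropWhile p l := by
  cases h : List.dropWhile p l with
  | nil => simp
  | cons a t =>
    have : p a = false := by
      have := List.head_dropWhile_not p (l := l) (by simp [h])
      simpa [h] using this
    simp [this]

theorem pv_rstrip_allws {r : List Char} (h : r.all PySem.Chars.isspace) :
    PySem.Chars.rstrip r = [] := by
  simp only [PySem.Chars.rstrip]
  rw [List.dropWhile_eq_nil_iff.2 (by intro x hx; exact (List.all_eq_true.1 h) x (by simpa using hx))]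
  simp

theorem pv_rstrip_append {l w : List Char} (hw : w.all PySem.Chars.isspace) :
    PySem.Chars.rstrip (l ++ w) = PySem.Chars.rstrip l := by
  simp only [PySem.Chars.rstrip, List.reverse_append]
  rw [List.dropWhile_append]
  have : List.dropWhile PySem.Chars.isspace w.reverse = [] :=
    List.dropWhile_eq_nil_iff.2 (by intro x hx; exact (List.all_eq_true.1 hw) x (by simpa using hx))
  simp [this]

theorem pv_rstrip_cons (a : Char) (r : List Char) :
    PySem.Chars.rstrip (a :: r)
      = if (a :: r).all PySem.Chars.isspace then [] else a :: PySem.Chars.rstrip r := by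
  by_cases hall : (a :: r).all PySem.Chars.isspace
  · simp [pv_rstrip_allws hall, hall]
  · simp only [hall]
    by_cases hr : r.all PySem.Chars.isspace
    · have ha : PySem.Chars.isspace a = false := by
        by_contra hh
        exact hall (by simp_all [List.all_cons])
      rw [show a :: r = [a] ++ r by rfl, pv_rstrip_append hr, pv_rstrip_allws hr]
      simp [PySem.Chars.rstrip, ha]
    · simp only [PySem.Chars.rstrip, List.reverse_cons]
      rw [List.dropWhile_append]
      have hne : List.dropWhile PySem.Chars.isspace r.reverse ≠ [] := by
        rw [Ne, List.dropWhile_eq_nil_iff]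
        intro hforall
        exact hr (List.all_eq_true.2 (fun x hx => hforall x (by simpa using hx)))
      simp [List.isEmpty_iff, hne]

theorem pv_rstrip_idem (x : List Char) :
    PySem.Chars.rstrip (PySem.Chars.rstrip x) = PySem.Chars.rstrip x := by
  simp [PySem.Chars.rstrip, pv_dropWhile_dropWhile]

theorem pv_strip_cons (c : Char) (t : List Char) :
    PySem.Chars.strip (c :: t)
      = if PySem.Chars.isspace c then PySem.Chars.strip t else c :: PySem.Chars.rstrip t := by
  simp only [PySem.Chars.strip, PySem.Chars.lstrip, List.dropWhile_cons]
  by_cases hc : PySem.Chars.isspace c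
  · simp [hc]
  · simp only [hc, if_false, Bool.false_eq_true]
    rw [pv_rstrip_cons]
    simp [List.all_cons, hc]

theorem pv_strip_allws {r : List Char} (h : r.all PySem.Chars.isspace) :
    PySem.Chars.strip r = [] := by
  simp only [PySem.Chars.strip, PySem.Chars.lstrip]
  rw [List.dropWhile_eq_nil_iff.2 (fun x hx => (List.all_eq_true.1 h) x hx)]
  simp [PySem.Chars.rstrip]

theorem pv_strip_eq_nil_iff (r : List Char) :
    PySem.Chars.strip r = [] ↔ r.all PySem.Chars.isspace := by
  constructor
  · intro h
    induction r with
    | nil => simp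
    | cons c t ih =>
      rw [pv_strip_cons] at h
      by_cases hc : PySem.Chars.isspace c
      · simp only [hc, if_true] at h
        simp [List.all_cons, hc, ih h]
      · simp [hc] at h
  · exact pv_strip_allws

theorem pv_strip_rstrip (x : List Char) :
    PySem.Chars.strip (PySem.Chars.rstrip x) = PySem.Chars.strip x := by
  induction x with
  | nil => simp [PySem.Chars.rstrip]
  | cons c t ih =>
    rw [pv_rstrip_cons]
    by_cases hall : (c :: t).all PySem.Chars.isspace
    · rw [if_pos hall, pv_strip_allws hall]
      simp [PySem.Chars.strip, PySem.Chars.lstrip, PySem.Chars.rstrip]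
    · rw [if_neg hall, pv_strip_cons, pv_strip_cons]
      by_cases hc : PySem.Chars.isspace c
      · simp [hc, ih]
      · simp [hc, pv_rstrip_idem]

-- ===== pvLines / pvProc / pvF structural lemmas =====
def pvProc (line : List Char) : List (List Char) :=
  let s := PySem.Chars.strip line
  if PySem.Chars.startswith s ['-', ' '] || PySem.Chars.startswith s ['*', ' '] then
    [PySem.Chars.strip (s.drop 2)]
  else []

def pvF (cs : List Char) : List (List Char) := (pvLines cs).flatMap pvProc

theorem pv_split_first {cs : List Char} (h : '\n' ∈ cs) :
    ∃ l t, cs = l ++ '\n' :: t ∧ '\n' ∉ l ∧ t.length < cs.length := by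
  set l := cs.takeWhile (fun c => decide (c ≠ '\n')) with hl
  set d := cs.dropWhile (fun c => decide (c ≠ '\n')) with hd
  have hdne : d ≠ [] := by
    rw [hd, Ne, List.dropWhile_eq_nil_iff]
    intro hall
    simpa using hall '\n' h
  have hhead : ¬ (d.head hdne ≠ '\n') := by
    have := List.head_dropWhile_not (fun c => decide (c ≠ '\n')) (l := cs) (by rw [← hd] at *; exact hdne)
    simpa [hd] using this
  obtain ⟨c, t, hct⟩ : ∃ c t, d = c :: t := by
    cases hdd : d with
    | nil => exact absurd hdd hdne
    | cons a b => exact ⟨a, b, rfl⟩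
  have hc : c = '\n' := by
    have := hhead
    simp [hct] at this
    exact this
  refine ⟨l, t, ?_, ?_, ?_⟩
  · rw [← List.takeWhile_append_dropWhile (p := fun c => decide (c ≠ '\n')) (l := cs)]
    rw [← hl, ← hd, hct, hc]
  · intro hmem
    have := List.mem_takeWhile_imp hmem
    simp at this
  · have hlen : cs.length = l.length + d.length := by
      conv_lhs => rw [← List.takeWhile_append_dropWhile (p := fun c => decide (c ≠ '\n')) (l := cs)]
      rw [List.length_append, ← hl, ← hd]
    rw [hct] at hlen
    simp at hlen
    omega

theorem pvLines_no_nl {cs : List Char} (h : '\n' ∉ cs) : pvLines cs = [cs] := by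
  induction cs with
  | nil => simp [pvLines]
  | cons c t ih =>
    have hc : c ≠ '\n' := by intro hh; exact h (by simp [hh])
    have ht : '\n' ∉ t := by intro hh; exact h (by simp [hh])
    simp [pvLines, hc, ih ht, List.modifyHead]

theorem pvLines_append {l : List Char} (t : List Char) (h : '\n' ∉ l) :
    pvLines (l ++ '\n' :: t) = l :: pvLines t := by
  induction l with
  | nil => simp [pvLines]
  | cons c r ih =>
    have hc : c ≠ '\n' := by intro hh; exact h (by simp [hh])
    have hr : '\n' ∉ r := by intro hh; exact h (by simp [hh])
    simp [pvLines, hc, ih hr, List.modifyHead]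

theorem pvF_no_nl {cs : List Char} (h : '\n' ∉ cs) : pvF cs = pvProc cs := by
  simp [pvF, pvLines_no_nl h]

theorem pvF_append {l : List Char} (t : List Char) (h : '\n' ∉ l) :
    pvF (l ++ '\n' :: t) = pvProc l ++ pvF t := by
  simp [pvF, pvLines_append t h]

theorem pv_startswith_nil (p : List Char) (hp : p ≠ []) : PySem.Chars.startswith [] p = false := by
  cases p with
  | nil => exact absurd rfl hp
  | cons a b => simp [PySem.Chars.startswith, List.isPrefixOf]

theorem pvProc_nil : pvProc [] = [] := by decide

theorem pvProc_allws {r : List Char} (h : r.all PySem.Chars.isspace) : pvProc r = [] := by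
  simp [pvProc, pv_strip_allws h, pv_startswith_nil]

theorem pv_strip_append_ws {x w : List Char} (hw : w.all PySem.Chars.isspace) :
    PySem.Chars.strip (x ++ w) = PySem.Chars.strip x := by
  simp only [PySem.Chars.strip, PySem.Chars.lstrip, List.dropWhile_append]
  by_cases hx : (List.dropWhile PySem.Chars.isspace x).isEmpty
  · simp only [hx, if_true]
    have hxall : x.all PySem.Chars.isspace := by
      rw [List.isEmpty_iff, List.dropWhile_eq_nil_iff] at hx
      exact List.all_eq_true.2 hx
    have h1 : PySem.Chars.rstrip (List.dropWhile PySem.Chars.isspace w) = [] := by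
      apply pv_rstrip_allws
      exact List.all_eq_true.2 fun c hc => (List.all_eq_true.1 hw) c (List.IsSuffix.mem hc (List.dropWhile_suffix _))
    have h2 : PySem.Chars.rstrip (List.dropWhile PySem.Chars.isspace x) = [] := by
      rw [List.isEmpty_iff.1 hx]; rfl
    rw [h1, h2]
  · simp only [hx]
    exact pv_rstrip_append hw

theorem pvProc_append_ws {x w : List Char} (hw : w.all PySem.Chars.isspace) :
    pvProc (x ++ w) = pvProc x := by
  simp [pvProc, pv_strip_append_ws hw]

theorem pvProc_ws_cons {c : Char} (h : PySem.Chars.isspace c) (t : List Char) :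
    pvProc (c :: t) = pvProc t := by
  simp [pvProc, pv_strip_cons, h]

theorem pv_all_of_append_left {w1 w2 : List Char} (h : (w1 ++ w2).all PySem.Chars.isspace) :
    w1.all PySem.Chars.isspace := by
  rw [List.all_append, Bool.and_eq_true] at h
  exact h.1

theorem pv_all_of_append_right {w1 w2 : List Char} (h : (w1 ++ w2).all PySem.Chars.isspace) :
    w2.all PySem.Chars.isspace := by
  rw [List.all_append, Bool.and_eq_true] at h
  exact h.2

theorem pvF_allws : ∀ n (v : List Char), v.length ≤ n → v.all PySem.Chars.isspace → pvF v = [] := by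
  intro n
  induction n with
  | zero =>
    intro v hn hv
    have : v = [] := List.length_eq_zero_iff.1 (Nat.le_zero.1 hn)
    subst this
    simp [pvF, pvLines, pvProc_nil]
  | succ n ih =>
    intro v hn hv
    by_cases hmem : '\n' ∈ v
    · obtain ⟨l, t, rfl, hl, hlen⟩ := pv_split_first hmem
      rw [pvF_append t hl, pvProc_allws (pv_all_of_append_left hv)]
      have ht : t.all PySem.Chars.isspace := by
        have := pv_all_of_append_right (w1 := l) hv
        simp only [List.all_cons, Bool.and_eq_true] at this
        exact this.2
      have : t.length ≤ n := by simp at hn hlen ⊢; omega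
      simp [ih t this ht]
    · rw [pvF_no_nl hmem, pvProc_allws hv]

theorem pvF_lstrip (cs : List Char) : pvF (PySem.Chars.lstrip cs) = pvF cs := by
  induction cs with
  | nil => simp [PySem.Chars.lstrip]
  | cons c t ih =>
    by_cases hc : PySem.Chars.isspace c
    · have hl : PySem.Chars.lstrip (c :: t) = PySem.Chars.lstrip t := by
        simp [PySem.Chars.lstrip, hc]
      rw [hl, ih]
      by_cases hnl : c = '\n'
      · subst hnl
        simp [pvF, pvLines, pvProc_nil]
      · simp only [pvF, pvLines, if_neg hnl]
        cases ht : pvLines t with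
        | nil => exact absurd ht (pvLines_ne_nil t)
        | cons a b =>
          simp [List.modifyHead, pvProc_ws_cons hc]
    · simp [PySem.Chars.lstrip, hc]

theorem pvF_append_ws : ∀ n (x w : List Char), x.length ≤ n → w.all PySem.Chars.isspace →
    pvF (x ++ w) = pvF x := by
  intro n
  induction n with
  | zero =>
    intro x w hn hw
    have : x = [] := List.length_eq_zero_iff.1 (Nat.le_zero.1 hn)
    subst this
    simp only [List.nil_append]
    rw [pvF_allws w.length w le_rfl hw]
    simp [pvF, pvLines, pvProc_nil]
  | succ n ih =>
    intro x w hn hw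
    by_cases hmem : '\n' ∈ x
    · obtain ⟨l, t, rfl, hl, hlen⟩ := pv_split_first hmem
      have h1 : (l ++ '\n' :: t) ++ w = l ++ '\n' :: (t ++ w) := by simp
      rw [h1, pvF_append (t ++ w) hl, pvF_append t hl]
      have : t.length ≤ n := by simp at hn hlen ⊢; omega
      rw [ih t w this hw]
    · by_cases hmw : '\n' ∈ w
      · obtain ⟨w1, w2, hw12, hw1, _⟩ := pv_split_first hmw
        have h1 : x ++ w = (x ++ w1) ++ '\n' :: w2 := by rw [hw12]; simp
        have hxw1 : '\n' ∉ x ++ w1 := by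
          intro hh
          rcases List.mem_append.1 hh with h' | h'
          · exact hmem h'
          · exact hw1 h'
        rw [h1, pvF_append w2 hxw1]
        rw [hw12] at hw
        have hw1s : w1.all PySem.Chars.isspace := pv_all_of_append_left hw
        have hw2s : w2.all PySem.Chars.isspace := by
          have := pv_all_of_append_right (w1 := w1) hw
          simp only [List.all_cons, Bool.and_eq_true] at this
          exact this.2
        rw [pvProc_append_ws hw1s, pvF_allws w2.length w2 le_rfl hw2s]
        simp [pvF_no_nl hmem]
      · have hxw : '\n' ∉ x ++ w := by
          intro hh
          rcases List.mem_append.1 hh with h' | h'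
          · exact hmem h'
          · exact hmw h'
        rw [pvF_no_nl hxw, pvF_no_nl hmem, pvProc_append_ws hw]

theorem pv_rstrip_decomp (s : List Char) :
    ∃ w, s = PySem.Chars.rstrip s ++ w ∧ w.all PySem.Chars.isspace := by
  refine ⟨(s.reverse.takeWhile PySem.Chars.isspace).reverse, ?_, ?_⟩
  · conv_lhs => rw [← List.reverse_reverse s,
      ← List.takeWhile_append_dropWhile (p := PySem.Chars.isspace) (l := s.reverse),
      List.reverse_append]
    rfl
  · exact List.all_eq_true.2 fun c hc => List.mem_takeWhile_imp (by simpa using hc)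

theorem pvF_strip (cs : List Char) : pvF (PySem.Chars.strip cs) = pvF cs := by
  have h1 : pvF (PySem.Chars.rstrip (PySem.Chars.lstrip cs)) = pvF (PySem.Chars.lstrip cs) := by
    obtain ⟨w, hdecomp, hw⟩ := pv_rstrip_decomp (PySem.Chars.lstrip cs)
    conv_rhs => rw [hdecomp]
    rw [pvF_append_ws (PySem.Chars.rstrip (PySem.Chars.lstrip cs)).length _ w le_rfl hw]
  rw [PySem.Chars.strip, h1, pvF_lstrip]

theorem pv_run0 (w : List Char) (b : List Char) (fs : List (List Char))
    (h : ∀ c ∈ w, PySem.Chars.isspace c = true ∧ c ≠ '\n') :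
    List.foldl pvStep (0, b, fs) w = (0, b, fs) := by
  induction w with
  | nil => rfl
  | cons c t ih =>
    obtain ⟨hws, hnl⟩ := h c (by simp)
    have hm : ¬ (c = '-' ∨ c = '*') := by
      rintro (rfl | rfl) <;> simp [PySem.Chars.isspace] at hws
    rw [List.foldl_cons]
    rw [show pvStep (0, b, fs) c = (0, b, fs) by simp [pvStep, hnl, hm, hws]]
    exact ih fun c hc => h c (by simp [hc])

theorem pv_run2 (r : List Char) (b : List Char) (fs : List (List Char)) (h : '\n' ∉ r) :
    List.foldl pvStep (2, b, fs) r = (2, b ++ r, fs) := by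
  induction r generalizing b with
  | nil => simp
  | cons c t ih =>
    have hnl : c ≠ '\n' := fun hh => h (by simp [hh])
    rw [List.foldl_cons]
    rw [show pvStep (2, b, fs) c = (2, b ++ [c], fs) by simp [pvStep, hnl]]
    rw [ih (b ++ [c]) (fun hh => h (by simp [hh]))]
    simp

theorem pv_run3 (r : List Char) (b : List Char) (fs : List (List Char)) (h : '\n' ∉ r) :
    List.foldl pvStep (3, b, fs) r = (3, b, fs) := by
  induction r with
  | nil => rfl
  | cons c t ih =>
    have hnl : c ≠ '\n' := fun hh => h (by simp [hh])
    rw [List.foldl_cons]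
    rw [show pvStep (3, b, fs) c = (3, b, fs) by simp [pvStep, hnl]]
    exact ih fun hh => h (by simp [hh])

theorem pv_sw2_true {m c : Char} (x : List Char) (hm : m = '-' ∨ m = '*') (hc : c = ' ') :
    (PySem.Chars.startswith (m :: c :: x) ['-', ' '] || PySem.Chars.startswith (m :: c :: x) ['*', ' ']) = true := by
  subst hc
  rcases hm with rfl | rfl <;> simp [PySem.Chars.startswith, List.isPrefixOf]

theorem pv_sw2_false {m c : Char} (x : List Char) (hmc : ¬ ((m = '-' ∨ m = '*') ∧ c = ' ')) :
    (PySem.Chars.startswith (m :: c :: x) ['-', ' '] || PySem.Chars.startswith (m :: c :: x) ['*', ' ']) = false := by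
  simp only [PySem.Chars.startswith, List.isPrefixOf, Bool.or_eq_false_iff, Bool.and_eq_false_iff]
  have hmc' : (m = '-' ∨ m = '*') → c ≠ ' ' := fun h1 h2 => hmc ⟨h1, h2⟩
  by_cases hm : m = '-'
  · subst hm
    have := hmc' (Or.inl rfl)
    constructor
    · right; left; simp; exact fun hh => this hh.symm
    · left; simp
  · by_cases hm' : m = '*'
    · subst hm'
      have := hmc' (Or.inr rfl)
      constructor
      · left; simp
      · right; left; simp; exact fun hh => this hh.symm
    · constructor
      · left; simp; exact fun hh => hm hh.symm
      · left; simp; exact fun hh => hm' hh.symm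

theorem pv_sw_short (s : List Char) (hs : s.length ≤ 1) :
    (PySem.Chars.startswith s ['-', ' '] || PySem.Chars.startswith s ['*', ' ']) = false := by
  match s, hs with
  | [], _ => rfl
  | [a], _ => simp [PySem.Chars.startswith, List.isPrefixOf]

theorem pv_rstrip_nil : PySem.Chars.rstrip ([] : List Char) = [] := rfl

theorem pv_rstrip_single {m : Char} (hm : PySem.Chars.isspace m = false) :
    PySem.Chars.rstrip [m] = [m] := by
  rw [pv_rstrip_cons]
  simp [hm, pv_rstrip_nil]

theorem pv_rstrip_cons_cons {m c : Char} {r : List Char} (hm : PySem.Chars.isspace m = false) :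
    PySem.Chars.rstrip (m :: c :: r) = m :: PySem.Chars.rstrip (c :: r) := by
  rw [pv_rstrip_cons, if_neg (by simp [List.all_cons, hm])]

theorem pv_line (l : List Char) (h : '\n' ∉ l) (fs : List (List Char)) :
    ∃ m b, List.foldl pvStep (0, [], fs) l = (m, b, fs) ∧
      (if m = 2 then pvEmit b fs else fs) = fs ++ pvProc l := by
  have hsplit : l = l.takeWhile PySem.Chars.isspace ++ l.dropWhile PySem.Chars.isspace :=
    (List.takeWhile_append_dropWhile).symm
  have hstrip : PySem.Chars.strip l = PySem.Chars.rstrip (l.dropWhile PySem.Chars.isspace) := rfl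
  have hrunw : List.foldl pvStep (0, [], fs) (l.takeWhile PySem.Chars.isspace) = (0, [], fs) := by
    apply pv_run0
    intro c hc
    exact ⟨List.mem_takeWhile_imp hc,
      fun hh => h (hh ▸ List.IsPrefix.mem hc (List.takeWhile_prefix _))⟩
  have hfold : List.foldl pvStep (0, [], fs) l
      = List.foldl pvStep (0, [], fs) (l.dropWhile PySem.Chars.isspace) := by
    conv_lhs => rw [hsplit]
    rw [List.foldl_append, hrunw]
  have hdropsub : ∀ c, c ∈ l.dropWhile PySem.Chars.isspace → c ∈ l :=
    fun c hc => List.IsSuffix.mem hc (List.dropWhile_suffix _)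
  cases hr : l.dropWhile PySem.Chars.isspace with
  | nil =>
    refine ⟨0, [], by rw [hfold, hr]; rfl, ?_⟩
    have : l.all PySem.Chars.isspace := List.all_eq_true.2 (List.dropWhile_eq_nil_iff.1 hr)
    simp [pvProc_allws this]
  | cons m rest =>
    have hmws : PySem.Chars.isspace m = false := by
      have := List.head_dropWhile_not PySem.Chars.isspace (l := l) (by simp [hr])
      simpa [hr] using this
    have hmnl : m ≠ '\n' := fun hh => h (hh ▸ hdropsub m (by simp [hr]))
    by_cases hmark : m = '-' ∨ m = '*'
    · have hstep1 : pvStep (0, [], fs) m = (1, [], fs) := by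
        simp [pvStep, hmnl, hmark]
      cases rest with
      | nil =>
        refine ⟨1, [], by rw [hfold, hr, List.foldl_cons, hstep1]; rfl, ?_⟩
        have h2 : pvProc l = [] := by
          simp only [pvProc, hstrip, hr]
          rw [pv_rstrip_single hmws, pv_sw_short [m] (by simp)]
          simp
        simp [h2]
      | cons c r2 =>
        have hcnl : c ≠ '\n' := fun hh => h (hh ▸ hdropsub c (by simp [hr]))
        have hr2nl : '\n' ∉ r2 := fun hh => h (hdropsub '\n' (by simp [hr, hh]))
        by_cases hcsp : c = ' '
        · subst hcsp
          have hstep2 : pvStep (1, [], fs) ' ' = (2, [], fs) := by simp [pvStep]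
          have hrun : List.foldl pvStep (2, [], fs) r2 = (2, r2, fs) := pv_run2 r2 [] fs hr2nl
          refine ⟨2, r2,
            by rw [hfold, hr, List.foldl_cons, hstep1, List.foldl_cons, hstep2]; simpa using hrun, ?_⟩
          by_cases hall : r2.all PySem.Chars.isspace
          · have h1 : PySem.Chars.strip r2 = [] := pv_strip_allws hall
            have h2 : pvProc l = [] := by
              simp only [pvProc, hstrip, hr]
              rw [show m :: ' ' :: r2 = [m] ++ (' ' :: r2) by rfl,
                pv_rstrip_append (by simp [hall]; decide),
                pv_rstrip_single hmws, pv_sw_short [m] (by simp)]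
              simp
            simp [pvEmit, h1, h2]
          · have h1 : PySem.Chars.strip r2 ≠ [] := fun hh => hall ((pv_strip_eq_nil_iff r2).1 hh)
            have h2 : pvProc l = [PySem.Chars.strip r2] := by
              have hstep : PySem.Chars.rstrip (' ' :: r2) = ' ' :: PySem.Chars.rstrip r2 := by
                rw [pv_rstrip_cons, if_neg (by simp [List.all_cons, hall])]
              simp only [pvProc, hstrip, hr]
              rw [pv_rstrip_cons_cons hmws, hstep,
                pv_sw2_true _ hmark rfl]
              simp [pv_strip_rstrip]
            rw [h2]
            simp only [pvEmit]
            simp [h1]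
        · have hstep2 : pvStep (1, [], fs) c = (3, [], fs) := by simp [pvStep, hcnl, hcsp]
          have hrun : List.foldl pvStep (3, [], fs) r2 = (3, [], fs) := pv_run3 r2 [] fs hr2nl
          refine ⟨3, [],
            by rw [hfold, hr, List.foldl_cons, hstep1, List.foldl_cons, hstep2, hrun], ?_⟩
          have h2 : pvProc l = [] := by
            simp only [pvProc, hstrip, hr]
            by_cases hall : (c :: r2).all PySem.Chars.isspace
            · rw [show m :: c :: r2 = [m] ++ (c :: r2) by rfl,
                pv_rstrip_append hall, pv_rstrip_single hmws, pv_sw_short [m] (by simp)]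
              simp
            · have hstep : PySem.Chars.rstrip (c :: r2) = if (c :: r2).all PySem.Chars.isspace then [] else c :: PySem.Chars.rstrip r2 :=
                pv_rstrip_cons c r2
              rw [pv_rstrip_cons_cons hmws, hstep, if_neg hall,
                pv_sw2_false _ (by intro hh; exact hcsp hh.2)]
              simp
          simp [h2]
    · have hstep1 : pvStep (0, [], fs) m = (3, [], fs) := by
        simp [pvStep, hmnl, hmark, hmws]
      have hrestnl : '\n' ∉ rest := fun hh => h (hdropsub '\n' (by simp [hr, hh]))
      have hrun : List.foldl pvStep (3, [], fs) rest = (3, [], fs) := pv_run3 rest [] fs hrestnl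
      refine ⟨3, [], by rw [hfold, hr, List.foldl_cons, hstep1, hrun], ?_⟩
      have h2 : pvProc l = [] := by
        simp only [pvProc, hstrip, hr]
        by_cases hall : rest.all PySem.Chars.isspace
        · rw [show m :: rest = [m] ++ rest by rfl, pv_rstrip_append hall,
            pv_rstrip_single hmws, pv_sw_short [m] (by simp)]
          simp
        · have hx : PySem.Chars.rstrip (m :: rest) = m :: PySem.Chars.rstrip rest := by
            rw [pv_rstrip_cons,
              if_neg (by simp only [List.all_cons, Bool.and_eq_true]; intro hh; exact hall hh.2)]
          rw [hx]
          cases hrr : PySem.Chars.rstrip rest with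
          | nil =>
            rw [pv_sw_short [m] (by simp)]
            simp
          | cons a b =>
            rw [pv_sw2_false _ (by intro hh; exact hmark hh.1)]
            simp
      simp [h2]

theorem pv_machine : ∀ n (cs : List Char) (fs : List (List Char)), cs.length ≤ n →
    pvFinish (List.foldl pvStep (0, [], fs) cs) = fs ++ pvF cs := by
  intro n
  induction n with
  | zero =>
    intro cs fs hn
    have : cs = [] := List.length_eq_zero_iff.1 (Nat.le_zero.1 hn)
    subst this
    simp [pvFinish, pvF, pvLines, pvProc_nil]
  | succ n ih =>
    intro cs fs hn
    by_cases hmem : '\n' ∈ cs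
    · obtain ⟨l, t, rfl, hl, hlen⟩ := pv_split_first hmem
      obtain ⟨m, b, heq, hfin⟩ := pv_line l hl fs
      have hnlstep : pvStep (m, b, fs) '\n' = (0, [], fs ++ pvProc l) := by
        rw [show pvStep (m, b, fs) '\n' = (0, [], if m = 2 then pvEmit b fs else fs) by
          simp [pvStep]]
        rw [hfin]
      have hsteps : List.foldl pvStep (0, [], fs) (l ++ '\n' :: t)
          = List.foldl pvStep (0, [], fs ++ pvProc l) t := by
        rw [List.foldl_append, heq, List.foldl_cons, hnlstep]
      have hlt : t.length ≤ n := by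
        simp only [List.length_append, List.length_cons] at hn hlen ⊢
        omega
      rw [hsteps, ih t _ hlt, pvF_append t hl, List.append_assoc]
    · obtain ⟨m, b, heq, hfin⟩ := pv_line cs hmem fs
      rw [heq]
      show (if m = 2 then pvEmit b fs else fs) = fs ++ pvF cs
      rw [hfin, pvF_no_nl hmem]

theorem pv_astep (facts : List (List Char)) (line : List Char) :
    (let line' := PySem.Chars.strip line
      if PySem.Chars.startswith line' ['-', ' '] then
        facts ++ [PySem.Chars.strip (PySem.Chars.slice line' (some 2) none)]
      else if PySem.Chars.startswith line' ['*', ' '] then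
        facts ++ [PySem.Chars.strip (PySem.Chars.slice line' (some 2) none)]
      else facts) = facts ++ pvProc line := by
  have hslice : PySem.Chars.slice (PySem.Chars.strip line) (some 2) none
      = (PySem.Chars.strip line).drop 2 := by
    rw [PySem.Chars.slice_eq_listSlice, PySem.List.slice_from _ (by norm_num)]
    rfl
  simp only [pvProc, hslice]
  by_cases h1 : PySem.Chars.startswith (PySem.Chars.strip line) ['-', ' '] <;>
    by_cases h2 : PySem.Chars.startswith (PySem.Chars.strip line) ['*', ' '] <;>
      simp [h1, h2]

theorem pv_ports_eq (output : String) : parse_output_py output = parse_output_py_alt output := by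
  have hB : parse_output_py_alt output = (pvF output.toList).map String.ofList := by
    unfold parse_output_py_alt
    rw [pv_machine output.toList.length output.toList [] le_rfl]
    rfl
  have hA : parse_output_py output
      = ((pvLines (PySem.Chars.strip output.toList)).foldl
          (fun facts line => facts ++ pvProc line) []).map String.ofList := by
    unfold parse_output_py
    rw [pv_splitOn]
    exact congrArg _ (PySem.List.foldl_congr_mem _ _ _ _ (fun acc x _ => pv_astep acc x))
  rw [hA, hB, PySem.List.foldl_append_eq_flatMap]
  rw [show (pvLines (PySem.Chars.strip output.toList)).flatMap pvProc
      = pvF (PySem.Chars.strip output.toList) from rfl]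
  rw [pvF_strip]
  rfl

-- ===== VERDICT (by name: the statement is the Claim_ definition above) =====
theorem parse_output_py_spec : Claim_equal_parse_output_py := by
  intro output _
  show parse_output_py output = parse_output_py_alt output
  exact pv_ports_eq output
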